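-- pv_equiv track=rewrite | github.com/monosd-prog/pump_short | scripts/cleanup_short_pump_live_duplicate_outcomes.py | _choose_keep_indices
-- ===== SOURCE A (Python) =====
-- from typing import Dict, List, Tuple
--
-- def _same_outcome_payload(a: Dict[str, str], b: Dict[str, str]) -> bool:
--     """Check if two rows are semantically the same final outcome."""
--     keys = ["outcome", "pnl_r", "pnl_pct", "exit_price"]
--     for k in keys:
--         if (a.get(k) or "").strip() != (b.get(k) or "").strip():
--             return False
--     return True
--
-- def _choose_keep_indices(rows: List[Dict[str, str]], indices: List[int]) -> Tuple[bool, List[int]]: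
--     """
--     Decide which indices to keep for one duplicate group.
--     Returns (conflict, indices_to_keep).
--     - If all rows have same outcome/pnl/exit_price: keep earliest by outcome_time_utc.
--     - Else: conflict=True, keep all (caller will skip modifications).
--     """
--     base = rows[indices[0]]
--     if not all(_same_outcome_payload(base, rows[i]) for i in indices[1:]):
--         return True, indices[:]  # conflict
--
--     # All equal by payload; keep earliest by outcome_time_utc
--     best_idx = indices[0]
--     best_ts = (rows[best_idx].get("outcome_time_utc") or "").strip()
--     for i in indices[1:]:
--         ts = (rows[i].get("outcome_time_utc") or "").strip()
--         if ts and (not best_ts or ts < best_ts):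
--             best_idx = i
--             best_ts = ts
--     return False, [best_idx]
-- ===== SOURCE B (Python) =====
-- from typing import Dict, List, Tuple
--
-- def _choose_keep_indices(rows: List[Dict[str, str]], indices: List[int]) -> Tuple[bool, List[int]]:
--     def g(i: int, k: str) -> str:
--         return (rows[i].get(k) or "").strip()
--
--     # Materialise the payload table once; the group conflicts iff the first
--     # payload does not account for every row (a count/cardinality test).
--     ps = [(g(i, "outcome"), g(i, "pnl_r"), g(i, "pnl_pct"), g(i, "exit_price")) for i in indices]
--     if ps.count(ps[0]) != len(ps):
--         return True, indices[:]
--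
--     # Stable sort: empty timestamps rank last, ties keep the earliest index.
--     ranked = sorted(indices, key=lambda i: (g(i, "outcome_time_utc") == "", g(i, "outcome_time_utc")))
--     return False, [ranked[0]]
-- ===== Notes on version B (the rewrite author's own statement) =====
-- stated objective: alternative
-- what changed: B materialises the stripped payload table once and detects conflict as a count/cardinality test (ps.count(ps[0]) != len(ps)) instead of A's pairwise-to-base key-by-key all() scan, and picks the kept index as the head of a stable sort keyed by (timestamp=='', timestamp) instead of A's hand-rolled best_idx/best_ts running-minimum loop.
import Mathlib
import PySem

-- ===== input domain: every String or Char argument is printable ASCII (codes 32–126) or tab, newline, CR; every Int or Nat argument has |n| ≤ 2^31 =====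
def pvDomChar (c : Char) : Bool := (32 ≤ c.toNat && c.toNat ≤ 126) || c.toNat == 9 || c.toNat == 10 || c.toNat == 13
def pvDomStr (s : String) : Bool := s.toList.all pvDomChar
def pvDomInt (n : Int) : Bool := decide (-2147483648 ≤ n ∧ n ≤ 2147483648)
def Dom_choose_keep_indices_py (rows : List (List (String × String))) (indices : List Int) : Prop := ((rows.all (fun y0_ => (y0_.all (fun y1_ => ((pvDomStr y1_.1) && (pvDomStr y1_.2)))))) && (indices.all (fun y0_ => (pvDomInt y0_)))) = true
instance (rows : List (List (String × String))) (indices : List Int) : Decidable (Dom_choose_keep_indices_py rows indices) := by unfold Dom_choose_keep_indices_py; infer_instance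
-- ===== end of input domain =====

-- B builds the stripped payload table once and tests conflict by counting how often the first payload
-- occurs, and picks the kept index as the head of a stable sort keyed by (timestamp=='', timestamp),
-- replacing A's pairwise-to-base all() scan and its hand-rolled running-minimum loop.

-- ===== PORT A =====
-- (a.get(k) or "") : first-match association-list lookup; None and "" both give ""
def pvDictGet (row : List (String × String)) (k : String) : String :=
  ((PySem.Dict.mk row).get? k).getD ""
def pvSamePayload (a b : List (String × String)) : Bool :=
  (["outcome", "pnl_r", "pnl_pct", "exit_price"] : List String).all
    (fun k => PySem.Str.strip (pvDictGet a k) == PySem.Str.strip (pvDictGet b k))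
def pvTs (rows : List (List (String × String))) (i : Int) : String :=
  PySem.Str.strip (pvDictGet (PySem.List.pyGetD rows i []) "outcome_time_utc")
-- the loop body of A's keep-earliest scan
def pvAStep (rows : List (List (String × String))) (st : Int × String) (i : Int) : Int × String :=
  let ts := pvTs rows i
  if (ts != "") && (st.2 == "" || decide (ts < st.2)) then (i, ts) else st
def choose_keep_indices_py (rows : List (List (String × String))) (indices : List Int) : Bool × List Int :=
  let base := PySem.List.pyGetD rows (indices.headD 0) []
  if !(indices.tail.all (fun i => pvSamePayload base (PySem.List.pyGetD rows i []))) then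
    (true, indices)
  else
    let best := indices.tail.foldl (pvAStep rows) (indices.headD 0, pvTs rows (indices.headD 0))
    (false, [best.1])

-- ===== PORT B =====
-- g(i, k) = (rows[i].get(k) or "").strip()
def pvG (rows : List (List (String × String))) (i : Int) (k : String) : String :=
  PySem.Str.strip ((((PySem.Dict.mk (PySem.List.pyGetD rows i [])).get? k)).getD "")
def pvPayload (rows : List (List (String × String))) (i : Int) : String × String × String × String :=
  (pvG rows i "outcome", pvG rows i "pnl_r", pvG rows i "pnl_pct", pvG rows i "exit_price")
def choose_keep_indices_py_alt (rows : List (List (String × String))) (indices : List Int) : Bool × List Int :=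
  let ps := indices.map (pvPayload rows)
  -- ps.count(ps[0]) != len(ps)  (ps[0] via headD; Pre_ guarantees ps nonempty)
  if PySem.List.count ps (ps.headD ("", "", "", "")) != ps.length then
    (true, indices)
  else
    -- sorted(indices, key=lambda i: (g(i,"outcome_time_utc") == "", g(i,"outcome_time_utc")))[0]
    let ranked := PySem.List.sorted2 indices
      (fun i => pvG rows i "outcome_time_utc" == "")
      (fun i => pvG rows i "outcome_time_utc")
    (false, [ranked.headD 0])

-- ===== PRECONDITION & SPEC =====
-- Pre_ excludes inputs where Python A raises: empty indices (indices[0]) or an out-of-range index into rows.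
-- It also (conservatively) excludes inputs where a conflict is found before an out-of-range index is ever read,
-- so A returns (True, indices) thanks to all()'s short-circuit while B touches every index and raises.
def Pre_choose_keep_indices_py (rows : List (List (String × String))) (indices : List Int) : Prop :=
  indices ≠ [] ∧ ∀ i ∈ indices, -(rows.length : Int) ≤ i ∧ i < rows.length
instance (rows : List (List (String × String))) (indices : List Int) : Decidable (Pre_choose_keep_indices_py rows indices) := by unfold Pre_choose_keep_indices_py; infer_instance
def pvWitness_choose_keep_indices_py : (List (List (String × String))) × List Int :=
  ([[("outcome", "win"), ("outcome_time_utc", "2024-01-01")]], [0, 0])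
def Spec_choose_keep_indices_py (rows : List (List (String × String))) (indices : List Int) (out : Bool × List Int) : Prop := out = choose_keep_indices_py_alt rows indices
instance (rows : List (List (String × String))) (indices : List Int) (out : Bool × List Int) : Decidable (Spec_choose_keep_indices_py rows indices out) := by unfold Spec_choose_keep_indices_py; infer_instance

-- ===== CLAIM (what is proved, stated in full; the proofs are below) =====
def Claim_equal_choose_keep_indices_py : Prop := ∀ (rows : List (List (String × String))) (indices : List Int), Dom_choose_keep_indices_py rows indices → Pre_choose_keep_indices_py rows indices → Spec_choose_keep_indices_py rows indices (choose_keep_indices_py rows indices)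

-- ===== LEMMAS AND PROOFS =====

-- A's key-by-key payload comparison is equality of B's payload tuples.
theorem pvSame_eq_payload_beq (rows : List (List (String × String))) (i0 i : Int) :
    pvSamePayload (PySem.List.pyGetD rows i0 []) (PySem.List.pyGetD rows i [])
      = (pvPayload rows i0 == pvPayload rows i) := by
  simp only [pvSamePayload, pvPayload, pvG, pvDictGet, List.all_cons, List.all_nil, Bool.and_true]
  apply Bool.eq_iff_iff.mpr
  simp [Prod.ext_iff]

-- the "first element winning under a strict before-test" selection
def pvSel {α : Type} (before : α → α → Bool) (m x : α) : α := if before x m then x else m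

-- sorted2's comparison for B's key (ts == "", ts)
def pvBefore (rows : List (List (String × String))) (a b : Int) : Bool :=
  decide ((pvTs rows a == "") < (pvTs rows b == "")) ||
    (!decide ((pvTs rows b == "") < (pvTs rows a == "")) && decide (pvTs rows a < pvTs rows b))

theorem pvInsertBy_cons (before : Int → Int → Bool) (x a : Int) (acc : List Int) :
    PySem.List.insertBy before x (a :: acc) =
      if before x a then x :: a :: acc else a :: PySem.List.insertBy before x acc := by
  simp [PySem.List.insertBy]

theorem pvHead_foldl_insertBy (before : Int → Int → Bool) (d : Int) :
    ∀ (xs : List Int) (a : Int) (acc : List Int),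
    (xs.foldl (fun t x => PySem.List.insertBy before x t) (a :: acc)).headD d
      = xs.foldl (pvSel before) a := by
  intro xs
  induction xs with
  | nil => intro a acc; rfl
  | cons x xs ih =>
    intro a acc
    simp only [List.foldl_cons, pvInsertBy_cons]
    by_cases h : before x a
    · simp only [if_pos h, pvSel, ih]
    · simp only [if_neg h, pvSel, ih]

-- B's sorted2 over indices is the insertBy fold with pvBefore (definitional)
theorem pvSorted2_eq (rows : List (List (String × String))) (indices : List Int) :
    PySem.List.sorted2 indices
        (fun i => pvG rows i "outcome_time_utc" == "")
        (fun i => pvG rows i "outcome_time_utc")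
      = indices.foldl (fun acc x => PySem.List.insertBy (pvBefore rows) x acc) [] := rfl

-- A's replacement condition is exactly sorted2's lexicographic before-test
theorem pvCond_eq (s t : String) :
    ((s != "") && ((t == "") || decide (s < t)))
      = (decide ((s == "") < (t == "")) ||
         (!decide ((t == "") < (s == "")) && decide (s < t))) := by
  have hS : ∀ u : String, ¬ u = "" → (u == "") = false := fun u hu => by simpa using hu
  by_cases hs : s = "" <;> by_cases ht : t = ""
  · simp [hs, ht, lt_self_iff_false]
  · simp [hs, hS t ht, Bool.lt_iff]
  · simp [ht, hS s hs, bne, Bool.lt_iff]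
  · simp [hS s hs, hS t ht, bne]

-- A's running-minimum loop computes the pvSel fold (its state is always (m, ts m))
theorem pvALoop (rows : List (List (String × String))) (tl : List Int) :
    ∀ (b : Int),
    tl.foldl (pvAStep rows) (b, pvTs rows b)
      = (tl.foldl (pvSel (pvBefore rows)) b, pvTs rows (tl.foldl (pvSel (pvBefore rows)) b)) := by
  induction tl with
  | nil => intro b; rfl
  | cons i tl ih =>
    intro b
    simp only [List.foldl_cons]
    have hstep : pvAStep rows (b, pvTs rows b) i
        = (pvSel (pvBefore rows) b i, pvTs rows (pvSel (pvBefore rows) b i)) := by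
      simp only [pvAStep, pvSel, pvBefore, pvCond_eq (pvTs rows i) (pvTs rows b)]
      split <;> rfl
    rw [hstep, ih]

-- ===== VERDICT (by name: the statement is the Claim_ definition above) =====
set_option maxHeartbeats 1000000 in
theorem choose_keep_indices_py_spec : Claim_equal_choose_keep_indices_py := by
  intro rows indices _ hpre
  unfold Spec_choose_keep_indices_py
  match indices with
  | [] => exact absurd rfl hpre.1
  | i0 :: tl =>
    unfold choose_keep_indices_py choose_keep_indices_py_alt
    simp only [List.tail_cons, List.headD_cons, List.map_cons, List.length_cons,
      PySem.List.count_eq, List.count_cons_self]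
    by_cases hall : ∀ y ∈ tl.map (pvPayload rows), y = pvPayload rows i0
    · -- no conflict: count is full, all() is true; both take the keep branch
      have hA : tl.all (fun i => pvSamePayload (PySem.List.pyGetD rows i0 []) (PySem.List.pyGetD rows i [])) = true := by
        rw [List.all_eq_true]
        intro i hi
        rw [pvSame_eq_payload_beq]
        have := hall (pvPayload rows i) (List.mem_map_of_mem hi)
        simp [this]
      have hcnt : (tl.map (pvPayload rows)).count (pvPayload rows i0)
          = (tl.map (pvPayload rows)).length := by
        rw [List.count_eq_length]
        intro y hy
        exact (hall y hy).symm
      rw [hA, hcnt]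
      simp only [Bool.not_true, Bool.false_eq_true, if_false, bne_self_eq_false,
        Bool.false_eq_true, if_false]
      -- keep branch on both sides
      rw [pvALoop rows tl i0, pvSorted2_eq]
      simp only [List.foldl_cons]
      rw [show PySem.List.insertBy (pvBefore rows) i0 [] = [i0] from rfl,
        pvHead_foldl_insertBy (pvBefore rows) 0 tl i0 []]
    · -- conflict: count falls short, all() is false; both return (true, indices)
      push Not at hall
      obtain ⟨y, hy, hne⟩ := hall
      obtain ⟨i, hi, hPi⟩ := List.mem_map.mp hy
      have hA : tl.all (fun i => pvSamePayload (PySem.List.pyGetD rows i0 []) (PySem.List.pyGetD rows i [])) = false := by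
        rw [List.all_eq_false]
        refine ⟨i, hi, ?_⟩
        rw [pvSame_eq_payload_beq]
        simp only [beq_iff_eq]
        intro hcontra
        exact hne (by rw [← hPi, hcontra])
      have hcnt : (tl.map (pvPayload rows)).count (pvPayload rows i0)
          ≠ (tl.map (pvPayload rows)).length := by
        rw [Ne, List.count_eq_length]
        intro h
        exact hne (h y hy).symm
      rw [hA]
      have hbne : ((List.count (pvPayload rows i0) (tl.map (pvPayload rows)) + 1
          != (tl.map (pvPayload rows)).length + 1)) = true := by
        rw [bne_iff_ne]
        omega
      rw [hbne]
      simp
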